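-- pv_equiv track=rewrite | github.com/microsoft/superbenchmark | superbench/report/src/report_gen/utils/table.py | s2c_gpu_name
-- ===== SOURCE A (Python) =====
-- def s2c_gpu_name(input_string):
--     # convert small font before digits to capital font
--     output_string = ""
--     for char in input_string:
--         if char.isdigit():
--             output_string += input_string[input_string.index(char):]
--             break
--         else:
--             output_string += char.upper()
--     return output_string
-- ===== SOURCE B (Python) =====
-- def s2c_gpu_name(input_string):
--     # find-boundary-then-slice: index of first digit (or len), then one upper+concat
--     i = next((idx for idx, c in enumerate(input_string) if c.isdigit()), len(input_string))
--     return input_string[:i].upper() + input_string[i:]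
-- ===== Notes on version B (the rewrite author's own statement) =====
-- stated objective: simpler
-- what changed: Replaces the char-by-char accumulation loop with a self-referential str.index lookup by computing the first-digit boundary index once and returning input_string[:i].upper() + input_string[i:].
import Mathlib
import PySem

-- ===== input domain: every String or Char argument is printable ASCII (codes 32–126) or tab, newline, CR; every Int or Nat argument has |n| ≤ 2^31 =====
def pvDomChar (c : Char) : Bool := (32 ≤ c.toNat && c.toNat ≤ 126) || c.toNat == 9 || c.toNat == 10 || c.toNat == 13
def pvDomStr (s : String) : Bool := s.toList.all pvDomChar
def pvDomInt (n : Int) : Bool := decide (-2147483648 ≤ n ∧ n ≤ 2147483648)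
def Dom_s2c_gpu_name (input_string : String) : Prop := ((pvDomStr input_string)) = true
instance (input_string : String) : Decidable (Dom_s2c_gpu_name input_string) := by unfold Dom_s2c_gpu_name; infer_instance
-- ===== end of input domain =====

-- B computes the first-digit boundary index once and builds upper(prefix) ++ rest,
-- instead of A's char-by-char accumulation with a str.index lookup on the digit. (objective: simpler)

-- ===== PORT A =====
-- loop over the characters, accumulating out; on the first digit, append
-- input_string[input_string.index(char):] and stop.  input_string.index(char) is
-- the first occurrence of char (always present here, so the ValueError branch of
-- Python's .index is unreachable; the `.getD []` default is never taken).
def s2cLoopA (cs : List Char) : List Char → List Char → List Char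
  | [], out => out
  | c :: rest, out =>
    if PySem.Chars.isdigit c then
      out ++ ((PySem.List.index? cs c).map
        (fun i => PySem.List.slice cs (some (i : Int)) none)).getD []
    else s2cLoopA cs rest (out ++ [PySem.Chars.upperChar c])

def s2c_gpu_name (input_string : String) : String :=
  String.ofList (s2cLoopA input_string.toList input_string.toList [])

-- ===== PORT B =====
-- i = first index whose char is a digit (or len); return s[:i].upper() + s[i:]
def s2c_gpu_name_alt (input_string : String) : String :=
  let cs := input_string.toList
  let i := (cs.findIdx? (fun c => PySem.Chars.isdigit c)).getD cs.length
  String.ofList (PySem.Chars.upper (cs.take i) ++ cs.drop i)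

-- ===== PRECONDITION & SPEC =====
def Spec_s2c_gpu_name (input_string : String) (out : String) : Prop := out = s2c_gpu_name_alt input_string
instance (input_string : String) (out : String) : Decidable (Spec_s2c_gpu_name input_string out) := by unfold Spec_s2c_gpu_name; infer_instance

-- ===== CLAIM (what is proved, stated in full; the proofs are below) =====
def Claim_equal_s2c_gpu_name : Prop := ∀ (input_string : String), Dom_s2c_gpu_name input_string → Spec_s2c_gpu_name input_string (s2c_gpu_name input_string)

-- ===== LEMMAS AND PROOFS =====

-- the value B's tail computation ascribes to the unprocessed suffix
def altTail (cs pre suf : List Char) : List Char :=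
  match suf.findIdx? (fun c => PySem.Chars.isdigit c) with
  | some j => (suf.take j).map PySem.Chars.upperChar ++ cs.drop (pre.length + j)
  | none => suf.map PySem.Chars.upperChar

lemma index?_append_cons {pre rest : List Char} {c : Char} (h : c ∉ pre) :
    PySem.List.index? (pre ++ c :: rest) c = some pre.length := by
  induction pre with
  | nil => simp [PySem.List.index?_eq_idxOf?, List.idxOf?, List.findIdx?_cons]
  | cons a t ih =>
    have ha : a ≠ c := fun he => h (by simp [he])
    have ht : c ∉ t := fun hm => h (List.mem_cons_of_mem _ hm)
    rw [List.cons_append, PySem.List.index?_cons_of_ne _ ha, ih ht]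
    simp

lemma loopA_eq (cs : List Char) (suf : List Char) :
    ∀ pre out : List Char, cs = pre ++ suf →
      (∀ c ∈ pre, PySem.Chars.isdigit c = false) →
      s2cLoopA cs suf out = out ++ altTail cs pre suf := by
  induction suf with
  | nil => intro pre out h hp; simp [s2cLoopA, altTail]
  | cons c rest ih =>
    intro pre out h hp
    by_cases hd : PySem.Chars.isdigit c = true
    · have hcpre : c ∉ pre := fun hm => by simp [hp c hm] at hd
      rw [show s2cLoopA cs (c :: rest) out = out ++
            ((PySem.List.index? cs c).map
              (fun i => PySem.List.slice cs (some (i : Int)) none)).getD [] by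
            simp [s2cLoopA, hd]]
      rw [h, index?_append_cons hcpre]
      have : PySem.List.slice (pre ++ c :: rest) (some ((pre.length : Nat) : Int)) none
           = (pre ++ c :: rest).drop pre.length := PySem.List.slice_from_natCast _ _
      simp [altTail, List.findIdx?_cons, hd, this]
    · have hd' : PySem.Chars.isdigit c = false := by simpa using hd
      have h' : cs = (pre ++ [c]) ++ rest := by simp [h]
      have hp' : ∀ x ∈ pre ++ [c], PySem.Chars.isdigit x = false := by
        intro x hx
        rcases List.mem_append.1 hx with hx | hx
        · exact hp x hx
        · simp at hx; simpa [hx] using hd'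
      rw [show s2cLoopA cs (c :: rest) out
            = s2cLoopA cs rest (out ++ [PySem.Chars.upperChar c]) by
            simp [s2cLoopA, hd']]
      rw [ih (pre ++ [c]) (out ++ [PySem.Chars.upperChar c]) h' hp']
      simp only [altTail, List.findIdx?_cons, hd']
      cases hfr : rest.findIdx? (fun c => PySem.Chars.isdigit c) with
      | none => simp [List.append_assoc]
      | some j =>
        simp [List.append_assoc]
        omega

lemma upper_eq_map (l : List Char) : PySem.Chars.upper l = l.map PySem.Chars.upperChar := by
  simp [PySem.Chars.upper]

-- ===== VERDICT (by name: the statement is the Claim_ definition above) =====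
theorem s2c_gpu_name_spec : Claim_equal_s2c_gpu_name := by
  intro s _
  unfold Spec_s2c_gpu_name s2c_gpu_name s2c_gpu_name_alt
  rw [loopA_eq s.toList s.toList [] [] (by simp) (by simp)]
  cases hf : s.toList.findIdx? (fun c => PySem.Chars.isdigit c) with
  | none =>
    have : ∀ c ∈ s.toList, PySem.Chars.isdigit c = false := by
      intro c hc
      simpa using List.findIdx?_eq_none_iff.1 hf c hc
    simp only [altTail, hf]
    rw [upper_eq_map, List.take_of_length_le (by simp), List.drop_of_length_le (by simp)]; simp
  | some j =>
    simp [altTail, hf, upper_eq_map]
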